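-- pv_equiv track=rewrite | github.com/liupei101/PseMix | tools/panther_utils.py | infer_columns_for_splitting
-- ===== SOURCE A (Python) =====
-- def infer_columns_for_splitting(available_columns):
--     columns_with_key_words = ('train', 'test', 'val')
--
--     ret_columns = []
--     for c in columns_with_key_words:
--         target_c = None
--         for a_c in available_columns:
--             if c in a_c:
--                 target_c = a_c
--         ret_columns.append(target_c)
--
--     train_col, test_col, val_col = ret_columns
--     if test_col is None:
--         test_col = val_col
--         val_col  = None
--
--     assert train_col is not None, "The column corresponding to `train` is not found."
--     assert test_col is not None, "The column corresponding to `test` is not found."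
--
--     return train_col, test_col, val_col
-- ===== SOURCE B (Python) =====
-- def infer_columns_for_splitting(available_columns):
--     train_col = test_col = val_col = None
--     for a_c in reversed(available_columns):
--         if train_col is None and 'train' in a_c:
--             train_col = a_c
--         if test_col is None and 'test' in a_c:
--             test_col = a_c
--         if val_col is None and 'val' in a_c:
--             val_col = a_c
--         if train_col is not None and test_col is not None and val_col is not None:
--             break
--     if test_col is None:
--         test_col, val_col = val_col, None
--     assert train_col is not None, "The column corresponding to `train` is not found."
--     assert test_col is not None, "The column corresponding to `test` is not found."
--     return train_col, test_col, val_col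
-- ===== Notes on version B (the rewrite author's own statement) =====
-- stated objective: alternative
-- what changed: Replaces A's three full forward last-match scans (one per keyword) with a single backward first-match traversal that fills each slot once and stops early as soon as all three are found.
import Mathlib
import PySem

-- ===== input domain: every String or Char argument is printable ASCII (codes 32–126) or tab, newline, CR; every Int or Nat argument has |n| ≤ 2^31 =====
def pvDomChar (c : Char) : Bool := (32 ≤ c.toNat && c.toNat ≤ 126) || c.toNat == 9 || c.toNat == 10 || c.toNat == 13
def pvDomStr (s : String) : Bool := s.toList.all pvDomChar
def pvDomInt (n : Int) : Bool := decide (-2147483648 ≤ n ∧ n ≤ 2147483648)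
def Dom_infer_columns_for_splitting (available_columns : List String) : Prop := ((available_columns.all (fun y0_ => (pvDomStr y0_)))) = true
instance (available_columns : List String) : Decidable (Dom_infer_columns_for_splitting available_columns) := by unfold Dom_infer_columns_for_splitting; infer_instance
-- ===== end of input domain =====

-- B replaces A's three forward last-match scans with one backward first-match traversal that stops early; return value only.


-- ===== PORT A =====
-- inner loop: 'target_c = None; for a_c in available_columns: if c in a_c: target_c = a_c'
def pvScanA (c : String) (available_columns : List String) : Option String :=
  available_columns.foldl (fun target_c a_c => if PySem.Str.isIn c a_c then some a_c else target_c) none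

def infer_columns_for_splitting (available_columns : List String) : Option String × Option String × Option String :=
  let ret_columns := ["train", "test", "val"].foldl (fun acc c => acc ++ [pvScanA c available_columns]) []
  match ret_columns with
  | [train_col, test_col, val_col] =>
      if test_col = none then (train_col, val_col, none)
      else (train_col, test_col, val_col)
  | _ => (none, none, none)  -- unreachable: ret_columns always has 3 elements

-- ===== PORT B =====
-- 'if slot is None and kw in a_c: slot = a_c'
def pvStep (kw : String) (t : Option String) (a_c : String) : Option String :=
  if t.isNone && PySem.Str.isIn kw a_c then some a_c else t

-- 'for a_c in reversed(available_columns): fill empty slots; break when all filled'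
def pvGoB : List String → Option String × Option String × Option String → Option String × Option String × Option String
  | [], s => s
  | a_c :: rest, s =>
      let s' := (pvStep "train" s.1 a_c, pvStep "test" s.2.1 a_c, pvStep "val" s.2.2 a_c)
      if s'.1.isSome && s'.2.1.isSome && s'.2.2.isSome then s' else pvGoB rest s'

def infer_columns_for_splitting_alt (available_columns : List String) : Option String × Option String × Option String :=
  let s := pvGoB available_columns.reverse (none, none, none)
  if s.2.1 = none then (s.1, s.2.2, none) else s

-- ===== PRECONDITION & SPEC =====
-- Pre_ excludes exactly the inputs on which A's asserts fail (AssertionError): no column containing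
-- 'train', or no column containing 'test' nor 'val'.  B raises the same asserts there.
def Pre_infer_columns_for_splitting (available_columns : List String) : Prop :=
  available_columns.any (fun c => PySem.Str.isIn "train" c) = true ∧
  available_columns.any (fun c => PySem.Str.isIn "test" c || PySem.Str.isIn "val" c) = true
instance (available_columns : List String) : Decidable (Pre_infer_columns_for_splitting available_columns) := by unfold Pre_infer_columns_for_splitting; infer_instance

def pvWitness_infer_columns_for_splitting : List String := ["train_ids", "test_ids"]

def Spec_infer_columns_for_splitting (available_columns : List String) (out : Option String × Option String × Option String) : Prop := out = infer_columns_for_splitting_alt available_columns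
instance (available_columns : List String) (out : Option String × Option String × Option String) : Decidable (Spec_infer_columns_for_splitting available_columns out) := by unfold Spec_infer_columns_for_splitting; infer_instance

-- ===== CLAIM (what is proved, stated in full; the proofs are below) =====
def Claim_equal_infer_columns_for_splitting : Prop := ∀ (available_columns : List String), Dom_infer_columns_for_splitting available_columns → Pre_infer_columns_for_splitting available_columns → Spec_infer_columns_for_splitting available_columns (infer_columns_for_splitting available_columns)

-- ===== LEMMAS AND PROOFS =====
-- A's scan with a general initial accumulator.
def pvLast (kw : String) (a : Option String) (l : List String) : Option String :=
  l.foldl (fun t c => if PySem.Str.isIn kw c then some c else t) a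

-- B's fill loop as a plain fold (no early exit).
def pvFill (kw : String) (a : Option String) (l : List String) : Option String :=
  l.foldl (pvStep kw) a

theorem pvFill_some (kw : String) (x : String) (l : List String) :
    pvFill kw (some x) l = some x := by
  induction l with
  | nil => rfl
  | cons c l ih => simpa [pvFill, pvStep, List.foldl_cons] using ih

theorem pvLast_init (kw : String) (a : Option String) (l : List String) :
    pvLast kw a l = if pvLast kw none l = none then a else pvLast kw none l := by
  induction l generalizing a with
  | nil => simp [pvLast]
  | cons c l ih =>
      by_cases h : PySem.Str.isIn kw c = true
      · simp only [pvLast, List.foldl_cons, h, if_true]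
        rw [show (l.foldl (fun t c => if PySem.Str.isIn kw c then some c else t) (some c)) = pvLast kw (some c) l from rfl, ih (some c)]
        split <;> rfl
      · simp only [pvLast, List.foldl_cons, h]
        exact ih a

theorem pvFill_reverse (kw : String) (l : List String) :
    pvFill kw none l.reverse = pvLast kw none l := by
  induction l with
  | nil => rfl
  | cons c l ih =>
      have step : pvFill kw none (l.reverse ++ [c]) = pvStep kw (pvFill kw none l.reverse) c := by
        simp [pvFill, List.foldl_append]
      have rhs : pvLast kw none (c :: l)
          = pvLast kw (if PySem.Str.isIn kw c then some c else none) l := rfl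
      rw [List.reverse_cons, step, ih, rhs,
        pvLast_init kw (if PySem.Str.isIn kw c then some c else none) l]
      cases h : pvLast kw none l with
      | none => simp [pvStep]
      | some x => simp [pvStep]

theorem pvGoB_eq_fill (l : List String) (s : Option String × Option String × Option String) :
    pvGoB l s = (pvFill "train" s.1 l, pvFill "test" s.2.1 l, pvFill "val" s.2.2 l) := by
  induction l generalizing s with
  | nil => simp [pvGoB, pvFill]
  | cons c l ih =>
      obtain ⟨tr, te, va⟩ := s
      have hr : (pvFill "train" tr (c :: l), pvFill "test" te (c :: l), pvFill "val" va (c :: l))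
          = (pvFill "train" (pvStep "train" tr c) l, pvFill "test" (pvStep "test" te c) l,
             pvFill "val" (pvStep "val" va c) l) := rfl
      simp only [pvGoB]
      split
      · rename_i h
        simp only [Bool.and_eq_true] at h
        obtain ⟨x, hx⟩ := Option.isSome_iff_exists.mp h.1.1
        obtain ⟨y, hy⟩ := Option.isSome_iff_exists.mp h.1.2
        obtain ⟨z, hz⟩ := Option.isSome_iff_exists.mp h.2
        rw [hr, hx, hy, hz, pvFill_some, pvFill_some, pvFill_some]
      · rw [ih, hr]

theorem infer_columns_for_splitting_spec : Claim_equal_infer_columns_for_splitting := by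
  intro available_columns _ _
  unfold Spec_infer_columns_for_splitting infer_columns_for_splitting infer_columns_for_splitting_alt
  rw [pvGoB_eq_fill]
  simp only [pvFill_reverse]
  rfl
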